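-- pv_equiv track=rewrite | github.com/rprtr258/Hypertext-visual-novel | main.py | get_scenes
-- ===== SOURCE A (Python) =====
-- def erase_comments(s):
--     ptr = s.find('#')
--     if ptr == -1:
--         return s
--     while ptr > 0 and (s[ptr - 1] in " \t\b\r"):
--         ptr -= 1
--     return s[:ptr]
--
-- def get_scenes(lines):
--     scenes = []
--     curScene = []
--     for line in lines:
--         line = erase_comments(line)
--         if line[0] == "{":
--             if len(curScene) > 0:
--                 scenes.append(curScene)
--                 curScene = []
--             curScene.append(line)
--         else:
--             curScene.append(line)
--     if len(curScene) > 0: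
--         scenes.append(curScene)
--     return scenes
-- ===== SOURCE B (Python) =====
-- # B: two staged passes — strip comments from every line, record the indices of the
-- # '{' marker lines, then cut the cleaned list at those indices with slices and keep
-- # the non-empty segments (only the leading segment can be empty).
-- def erase_comments(s):
--     ptr = s.find('#')
--     if ptr == -1:
--         return s
--     while ptr > 0 and (s[ptr - 1] in " \t\b\r"):
--         ptr -= 1
--     return s[:ptr]
--
-- def get_scenes(lines):
--     cleaned = [erase_comments(line) for line in lines]
--     marks = [i for i, line in enumerate(cleaned) if line[0] == "{"]
--     bounds = [0] + marks + [len(cleaned)]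
--     segments = [cleaned[a:b] for a, b in zip(bounds, bounds[1:])]
--     return [seg for seg in segments if seg]
-- ===== Notes on version B (the rewrite author's own statement) =====
-- stated objective: alternative
-- what changed: B replaces A's incremental accumulate-and-flush loop with staged passes: it first strips comments from every line, then builds an index table of the '{' marker positions, cuts the cleaned list into segments by slicing between consecutive boundaries, and keeps the non-empty segments.
import Mathlib
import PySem

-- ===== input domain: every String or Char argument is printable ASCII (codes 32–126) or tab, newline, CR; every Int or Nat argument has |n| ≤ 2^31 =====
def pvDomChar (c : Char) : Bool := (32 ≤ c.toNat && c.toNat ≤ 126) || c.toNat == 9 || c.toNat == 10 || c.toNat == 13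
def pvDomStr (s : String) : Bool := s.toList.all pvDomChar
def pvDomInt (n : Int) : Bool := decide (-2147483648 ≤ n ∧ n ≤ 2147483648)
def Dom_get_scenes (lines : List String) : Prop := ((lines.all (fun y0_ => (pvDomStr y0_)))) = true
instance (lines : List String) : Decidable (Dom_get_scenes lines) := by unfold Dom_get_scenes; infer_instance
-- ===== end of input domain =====

-- B builds an index table of the '{' markers and slices the cleaned lines between
-- consecutive boundaries, instead of A's accumulate-and-flush loop; same return value.

-- ===== PORT A =====
-- helper erase_comments (shared by Source A and Source B): the rollback while-loop
def ecRollback (cs : List Char) (ptr : Int) : Int :=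
  if h : 0 < ptr ∧ ((PySem.List.pyGet? cs (ptr - 1)).any
      (fun c => PySem.Chars.isIn [c] " \t\x08\r".toList)) = true
  then ecRollback cs (ptr - 1) else ptr
termination_by ptr.toNat
decreasing_by omega

def eraseComments (s : String) : String :=
  let ptr := PySem.Str.find s "#"
  if ptr = -1 then s
  else PySem.Str.slice s none (some (ecRollback s.toList ptr))

def get_scenes (lines : List String) : List (List String) :=
  let r := lines.foldl (fun (st : List (List String) × List String) line =>
      let line := eraseComments line
      if PySem.Str.pyGet? line 0 = some '{' then
        if st.2.length > 0 then (st.1 ++ [st.2], [line])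
        else (st.1, st.2 ++ [line])
      else (st.1, st.2 ++ [line])) ([], [])
  if r.2.length > 0 then r.1 ++ [r.2] else r.1

-- ===== PORT B =====
def get_scenes_alt (lines : List String) : List (List String) :=
  let cleaned := lines.map eraseComments
  let marks := (PySem.List.enumerate cleaned 0).filterMap
      (fun p => if PySem.Str.pyGet? p.2 0 = some '{' then some p.1 else none)
  let bounds := 0 :: (marks ++ [(cleaned.length : Int)])
  let segments := (bounds.zip bounds.tail).map
      (fun p => PySem.List.slice cleaned (some p.1) (some p.2))
  segments.filter (fun seg => !seg.isEmpty)

-- ===== PRECONDITION & SPEC =====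
-- Pre_ excludes exactly the inputs on which A raises: lines whose comment-stripped form is
-- empty (the line is empty, or everything before its first '#' is in " \t\b\r"), where
-- A's line[0] raises IndexError.
def cleanedEmpty (l : String) : Bool :=
  l.toList.isEmpty || (l.toList.contains '#' &&
    (l.toList.takeWhile (fun c => c != '#')).all (fun c => " \t\x08\r".toList.contains c))

def Pre_get_scenes (lines : List String) : Prop :=
  ∀ l ∈ lines, cleanedEmpty l = false
instance (lines : List String) : Decidable (Pre_get_scenes lines) := by
  unfold Pre_get_scenes; infer_instance

def pvWitness_get_scenes : List String := ["{a", "b #c", "d"]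

def Spec_get_scenes (lines : List String) (out : List (List String)) : Prop := out = get_scenes_alt lines
instance (lines : List String) (out : List (List String)) : Decidable (Spec_get_scenes lines out) := by unfold Spec_get_scenes; infer_instance

-- ===== CLAIM (what is proved, stated in full; the proofs are below) =====
def Claim_equal_get_scenes : Prop := ∀ (lines : List String), Dom_get_scenes lines → Pre_get_scenes lines → Spec_get_scenes lines (get_scenes lines)

-- ===== LEMMAS AND PROOFS =====

-- proof-side name for A's loop body (on cleaned lines)
def stepA (st : List (List String) × List String) (line : String) : List (List String) × List String :=
  if PySem.Str.pyGet? line 0 = some '{' then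
    if st.2.length > 0 then (st.1 ++ [st.2], [line])
    else (st.1, st.2 ++ [line])
  else (st.1, st.2 ++ [line])

-- the leading run of non-marker lines, and the rest from the first marker on
def collectSeg : List String → List String
  | [] => []
  | l :: ls => if PySem.Str.pyGet? l 0 = some '{' then [] else l :: collectSeg ls

def dropSeg : List String → List String
  | [] => []
  | l :: ls => if PySem.Str.pyGet? l 0 = some '{' then l :: ls else dropSeg ls

theorem dropSeg_length_le (cs : List String) : (dropSeg cs).length ≤ cs.length := by
  induction cs with
  | nil => simp [dropSeg]
  | cons l ls ih =>
    rw [dropSeg]; split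
    · simp
    · exact le_trans ih (Nat.le_succ _)

-- the scene chunks of a list whose head (if any) is a marker
def sceneChunks : List String → List (List String)
  | [] => []
  | m :: ls => (m :: collectSeg ls) :: sceneChunks (dropSeg ls)
termination_by cs => cs.length
decreasing_by simpa using Nat.lt_succ_of_le (dropSeg_length_le ls)

theorem A_loop (rest : List String) : ∀ (scenes : List (List String)) (cur : List String), cur ≠ [] →
    (let r := rest.foldl stepA (scenes, cur);
     if r.2.length > 0 then r.1 ++ [r.2] else r.1)
    = scenes ++ ([cur ++ collectSeg rest] ++ sceneChunks (dropSeg rest)) := by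
  induction rest with
  | nil =>
    intro scenes cur hcur
    simp [collectSeg, dropSeg, sceneChunks, List.length_pos_iff, hcur]
  | cons r rs ih =>
    intro scenes cur hcur
    by_cases hp : PySem.List.pyGet? r.toList 0 = some '{'
    · have h1 : stepA (scenes, cur) r = (scenes ++ [cur], [r]) := by
        simp [stepA, hp, List.length_pos_iff, hcur]
      simp only [List.foldl_cons, h1]
      rw [ih (scenes ++ [cur]) [r] (by simp)]
      simp [collectSeg, dropSeg, hp, sceneChunks]
    · have h1 : stepA (scenes, cur) r = (scenes, cur ++ [r]) := by
        simp [stepA, hp]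
      simp only [List.foldl_cons, h1]
      rw [ih scenes (cur ++ [r]) (by simp)]
      simp [collectSeg, dropSeg, hp]

theorem get_scenes_eq_chunks (lines : List String) :
    get_scenes lines =
      (let cleaned := lines.map eraseComments;
       if collectSeg cleaned = [] then sceneChunks (dropSeg cleaned)
       else collectSeg cleaned :: sceneChunks (dropSeg cleaned)) := by
  have hA : get_scenes lines =
      (let r := (lines.map eraseComments).foldl stepA ([], []);
       if r.2.length > 0 then r.1 ++ [r.2] else r.1) := by
    simp only [get_scenes, List.foldl_map, stepA]
  rw [hA]
  cases h : lines.map eraseComments with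
  | nil => simp [collectSeg, dropSeg, sceneChunks]
  | cons c rest =>
    have h1 : stepA ([], []) c = ([], [c]) := by
      by_cases hp : PySem.List.pyGet? c.toList 0 = some '{' <;> simp [stepA, hp]
    simp only [List.foldl_cons, h1]
    rw [A_loop rest [] [c] (by simp)]
    by_cases hp : PySem.List.pyGet? c.toList 0 = some '{'
    · simp [collectSeg, dropSeg, hp, sceneChunks]
    · simp [collectSeg, dropSeg, hp]

-- ---- B side ----

-- proof-side names for B's intermediate values
def marksOf (cs : List String) : List Int :=
  (PySem.List.enumerate cs 0).filterMap
    (fun p => if PySem.Str.pyGet? p.2 0 = some '{' then some p.1 else none)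

def slicesOf (cs : List String) : Int → List Int → List (List String)
  | _, [] => []
  | a, b :: rest => PySem.List.slice cs (some a) (some b) :: slicesOf cs b rest

theorem zip_tail_map (cs : List String) : ∀ (l : List Int) (a : Int),
    ((a :: l).zip l).map (fun p => PySem.List.slice cs (some p.1) (some p.2))
      = slicesOf cs a l := by
  intro l
  induction l with
  | nil => intro a; rfl
  | cons b rest ih =>
    intro a
    simp only [List.zip_cons_cons, List.map_cons, slicesOf, ih b]

theorem enumerate_shift {α : Type} (xs : List α) (s : Int) :
    PySem.List.enumerate xs (s + 1) = (PySem.List.enumerate xs s).map (fun p => (p.1 + 1, p.2)) := by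
  induction xs generalizing s with
  | nil => simp [PySem.List.enumerate_nil]
  | cons x xs ih => simp [PySem.List.enumerate_cons, ih]

theorem marks_cons (c : String) (cs : List String) :
    marksOf (c :: cs)
      = (if PySem.List.pyGet? c.toList 0 = some '{' then [(0:Int)] else [])
          ++ (marksOf cs).map (· + 1) := by
  have hsh : PySem.List.enumerate cs 1
      = (PySem.List.enumerate cs 0).map (fun p : Int × String => (p.1 + 1, p.2)) := by
    simpa using enumerate_shift cs 0
  by_cases hp : PySem.List.pyGet? c.toList 0 = some '{' <;>
    simp [marksOf, PySem.List.enumerate_cons, hsh, List.filterMap_map, List.map_filterMap,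
      apply_ite (Option.map (· + (1:Int))), hp]

theorem marksOf_nonneg (cs : List String) : ∀ x ∈ marksOf cs, 0 ≤ x := by
  intro x hx
  simp only [marksOf, List.mem_filterMap] at hx
  obtain ⟨p, hp, hpx⟩ := hx
  rw [PySem.List.mem_enumerate_iff] at hp
  obtain ⟨k, hk, rfl⟩ := hp
  split at hpx
  · simp only [Option.some.injEq] at hpx; omega
  · exact absurd hpx (by simp)

theorem slice_succ (c : String) (cs : List String) (a b : Int) (ha : 0 ≤ a) (hb : 0 ≤ b) :
    PySem.List.slice (c :: cs) (some (a + 1)) (some (b + 1))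
      = PySem.List.slice cs (some a) (some b) := by
  rw [PySem.List.slice_toNat _ (by omega) (by omega), PySem.List.slice_toNat _ ha hb]
  have h1 : (a + 1).toNat = a.toNat + 1 := by omega
  have h2 : (b + 1).toNat = b.toNat + 1 := by omega
  simp [h1, h2]

theorem slice_zero_succ (c : String) (cs : List String) (b : Int) (hb : 0 ≤ b) :
    PySem.List.slice (c :: cs) (some 0) (some (b + 1))
      = c :: PySem.List.slice cs (some 0) (some b) := by
  rw [PySem.List.slice_toNat _ (by omega) (by omega), PySem.List.slice_toNat _ le_rfl hb]
  have h2 : (b + 1).toNat = b.toNat + 1 := by omega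
  simp [h2, List.take_succ_cons]

theorem slicesOf_shift (c : String) (cs : List String) :
    ∀ (bs : List Int) (a : Int), 0 ≤ a → (∀ x ∈ bs, 0 ≤ x) →
      slicesOf (c :: cs) (a + 1) (bs.map (· + 1)) = slicesOf cs a bs := by
  intro bs
  induction bs with
  | nil => intro a _ _; rfl
  | cons b rest ih =>
    intro a ha hnn
    have hb : 0 ≤ b := hnn b (by simp)
    simp only [List.map_cons, slicesOf]
    rw [slice_succ c cs a b ha hb,
      ih b hb (fun x hx => hnn x (List.mem_cons_of_mem _ hx))]

theorem segs_spec (cs : List String) :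
    slicesOf cs 0 (marksOf cs ++ [(cs.length : Int)])
      = collectSeg cs :: sceneChunks (dropSeg cs) := by
  induction cs with
  | nil =>
    have hz : PySem.List.slice ([] : List String) (some 0) (some 0) = ([] : List String) := by
      rw [PySem.List.slice_toNat _ le_rfl le_rfl]; simp
    simp [marksOf, PySem.List.enumerate_nil, slicesOf, collectSeg, dropSeg, sceneChunks, hz]
  | cons c cs ih =>
    have hnn : ∀ x ∈ marksOf cs ++ [(cs.length : Int)], 0 ≤ x := by
      intro x hx
      rcases List.mem_append.mp hx with h | h
      · exact marksOf_nonneg cs x h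
      · simp at h; omega
    cases hB : marksOf cs ++ [(cs.length : Int)] with
    | nil => exact absurd hB (by simp)
    | cons b0 rest =>
      rw [hB] at ih hnn
      have hb0 : 0 ≤ b0 := hnn b0 (by simp)
      simp only [slicesOf] at ih
      have h1 : PySem.List.slice cs (some 0) (some b0) = collectSeg cs :=
        ((List.cons.injEq _ _ _ _).mp ih).1
      have h2 : slicesOf cs b0 rest = sceneChunks (dropSeg cs) :=
        ((List.cons.injEq _ _ _ _).mp ih).2
      have hshift : slicesOf (c :: cs) (b0 + 1) (rest.map (· + 1))
          = slicesOf cs b0 rest :=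
        slicesOf_shift c cs rest b0 hb0 (fun x hx => hnn x (List.mem_cons_of_mem _ hx))
      have hmap : marksOf (c :: cs) ++ [(((c :: cs).length : Nat) : Int)]
          = (if PySem.List.pyGet? c.toList 0 = some '{' then [(0:Int)] else [])
              ++ ((b0 + 1) :: rest.map (· + 1)) := by
        rw [marks_cons, List.append_assoc]
        have hseg : (marksOf cs).map (· + 1) ++ [(((c :: cs).length : Nat) : Int)]
            = (b0 + 1) :: rest.map (· + 1) := by
          have h2' : (((c :: cs).length : Nat) : Int) = (cs.length : Int) + 1 := by
            push_cast [List.length_cons]; ring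
          rw [h2', show [(cs.length : Int) + 1] = [(cs.length : Int)].map (· + 1) from rfl,
            ← List.map_append, hB, List.map_cons]
        rw [hseg]
      by_cases hp : PySem.List.pyGet? c.toList 0 = some '{'
      · rw [show marksOf (c :: cs) ++ [(((c :: cs).length : Nat) : Int)]
            = 0 :: (b0 + 1) :: rest.map (· + 1) by rw [hmap, if_pos hp]; rfl]
        simp only [slicesOf]
        rw [hshift, h2]
        have hz : PySem.List.slice (c :: cs) (some 0) (some 0) = ([] : List String) := by
          rw [PySem.List.slice_toNat _ le_rfl le_rfl]; simp
        rw [hz, slice_zero_succ c cs b0 hb0, h1]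
        have hcol : collectSeg (c :: cs) = [] := by simp [collectSeg, hp]
        have hdrop : dropSeg (c :: cs) = c :: cs := by simp [dropSeg, hp]
        rw [hcol, hdrop, sceneChunks]
      · rw [show marksOf (c :: cs) ++ [(((c :: cs).length : Nat) : Int)]
            = (b0 + 1) :: rest.map (· + 1) by rw [hmap, if_neg hp]; rfl]
        simp only [slicesOf]
        rw [hshift, h2, slice_zero_succ c cs b0 hb0, h1]
        have hcol : collectSeg (c :: cs) = c :: collectSeg cs := by simp [collectSeg, hp]
        have hdrop : dropSeg (c :: cs) = dropSeg cs := by simp [dropSeg, hp]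
        rw [hcol, hdrop]

theorem filter_sceneChunks : ∀ cs : List String,
    (sceneChunks cs).filter (fun s => !s.isEmpty) = sceneChunks cs
  | [] => by simp [sceneChunks]
  | m :: ls => by
      rw [sceneChunks]
      simp [filter_sceneChunks (dropSeg ls)]
termination_by cs => cs.length
decreasing_by simpa using Nat.lt_succ_of_le (dropSeg_length_le ls)

theorem get_scenes_alt_eq_chunks (lines : List String) :
    get_scenes_alt lines =
      (let cleaned := lines.map eraseComments;
       if collectSeg cleaned = [] then sceneChunks (dropSeg cleaned)
       else collectSeg cleaned :: sceneChunks (dropSeg cleaned)) := by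
  have h : get_scenes_alt lines
      = ((((0 :: (marksOf (lines.map eraseComments) ++ [((lines.map eraseComments).length : Int)])).zip
          (marksOf (lines.map eraseComments) ++ [((lines.map eraseComments).length : Int)])).map
          (fun p => PySem.List.slice (lines.map eraseComments) (some p.1) (some p.2))).filter
          (fun seg => !seg.isEmpty)) := rfl
  rw [h, zip_tail_map, segs_spec, List.filter_cons]
  by_cases hc : collectSeg (lines.map eraseComments) = []
  · simp [hc, filter_sceneChunks]
  · simp [hc, filter_sceneChunks]

-- ===== VERDICT (by name: the statement is the Claim_ definition above) =====
theorem get_scenes_spec : Claim_equal_get_scenes := by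
  intro lines _ _
  unfold Spec_get_scenes
  rw [get_scenes_eq_chunks, get_scenes_alt_eq_chunks]
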